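-- pv_equiv track=rewrite | github.com/Matthew-Dam/MYCODE | DFS and BFS.py | BFS
-- ===== SOURCE A (Python) =====
-- from collections import deque
--
-- def BFS(graph, start, destination=None):
--     """BFS using deque and marking nodes as seen when enqueued to avoid
--     duplicates and to ensure parents reflect first-discovery."""
--     seen = {start}
--     queue = deque([start])
--     bfs_parent_map = {start: None}
--
--     while queue:
--         current = queue.popleft()
--
--         if destination is not None and current == destination:
--             break
--
--         for neighbor in graph.get(current, []):
--             if neighbor not in seen:
--                 seen.add(neighbor)
--                 bfs_parent_map[neighbor] = current
--                 queue.append(neighbor)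
--
--     return bfs_parent_map
-- ===== SOURCE B (Python) =====
-- def BFS(graph, start, destination=None):
--     """Level-synchronous BFS: explicit per-level frontier lists instead of a deque."""
--     seen = {start}
--     bfs_parent_map = {start: None}
--     frontier = [start]
--     done = False
--     while frontier:
--         next_frontier = []
--         for node in frontier:
--             if destination is not None and node == destination:
--                 done = True
--                 break
--             for neighbor in graph.get(node, []):
--                 if neighbor not in seen:
--                     seen.add(neighbor)
--                     bfs_parent_map[neighbor] = node
--                     next_frontier.append(neighbor)
--         if done:
--             break
--         frontier = next_frontier
--     return bfs_parent_map
-- ===== Notes on version B (the rewrite author's own statement) =====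
-- stated objective: alternative
-- what changed: Replaces the deque-driven single loop by level-synchronous BFS: explicit per-level frontier lists built in an outer while over levels, with a done flag for the destination break.
import Mathlib
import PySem

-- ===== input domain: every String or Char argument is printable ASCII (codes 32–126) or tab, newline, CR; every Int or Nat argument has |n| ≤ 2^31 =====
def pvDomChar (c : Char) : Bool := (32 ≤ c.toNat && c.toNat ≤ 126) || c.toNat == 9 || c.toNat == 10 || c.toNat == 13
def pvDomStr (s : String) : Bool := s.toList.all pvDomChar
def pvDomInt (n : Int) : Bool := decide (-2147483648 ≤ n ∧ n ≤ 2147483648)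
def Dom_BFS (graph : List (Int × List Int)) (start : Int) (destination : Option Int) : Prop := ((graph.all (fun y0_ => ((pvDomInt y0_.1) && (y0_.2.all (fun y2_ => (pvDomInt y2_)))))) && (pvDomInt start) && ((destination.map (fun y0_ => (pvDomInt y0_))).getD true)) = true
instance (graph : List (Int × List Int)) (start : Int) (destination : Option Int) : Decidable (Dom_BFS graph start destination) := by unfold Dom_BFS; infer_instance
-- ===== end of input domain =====

-- B replaces A's single deque-driven loop by level-synchronous BFS over explicit per-level
-- frontier lists (objective: alternative — same results, a different traversal bookkeeping).

-- ===== PORT A =====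
-- the inner `for neighbor in graph.get(node, []):` loop body, textually identical in Source A and
-- Source B; it threads (seen, parent_map, L) where L is the list being appended to (A: the queue
-- after popleft; B: next_frontier)
def bfsInnerGo (node : Int) (ns : List Int)
    (st : List Int × PySem.Dict Int (Option Int) × List Int) :
    List Int × PySem.Dict Int (Option Int) × List Int :=
  ns.foldl
    (fun st nb =>
      if nb ∈ st.1 then st
      else (PySem.Set.add st.1 nb, PySem.Dict.insert st.2.1 nb (some node), st.2.2 ++ [nb]))
    st

def bfsInner (graph : List (Int × List Int)) (node : Int)
    (st : List Int × PySem.Dict Int (Option Int) × List Int) :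
    List Int × PySem.Dict Int (Option Int) × List Int :=
  bfsInnerGo node (PySem.Dict.getD (PySem.Dict.mk graph) node []) st

-- `while queue:` with popleft at the front and append at the back; the fuel argument only
-- guards totality and is proved sufficient below (bfsCnt_le / bfs_loop_eq), it never runs out
def bfsLoopA (graph : List (Int × List Int)) (destination : Option Int) :
    Nat → List Int → PySem.Dict Int (Option Int) → List Int → PySem.Dict Int (Option Int)
  | _, _, m, [] => m
  | 0, _, m, _ :: _ => m
  | fuel+1, seen, m, current :: rest =>
    if destination = some current then m
    else
      let st := bfsInner graph current (seen, m, rest)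
      bfsLoopA graph destination fuel st.1 st.2.1 st.2.2

def BFS (graph : List (Int × List Int)) (start : Int) (destination : Option Int) :
    List (Int × Option Int) :=
  (bfsLoopA graph destination (1 + (graph.flatMap Prod.snd).length)
    (PySem.Set.ofList [start]) (PySem.Dict.ofList [(start, none)]) [start]).items

-- ===== PORT B =====
-- the inner `for node in frontier:` loop: expands each frontier node with bfsInner (appending
-- fresh nodes to next_frontier) and reports the destination break through the done flag
def bfsLevel (graph : List (Int × List Int)) (destination : Option Int) :
    List Int → List Int → PySem.Dict Int (Option Int) → List Int →
    List Int × PySem.Dict Int (Option Int) × List Int × Bool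
  | [], seen, m, next => (seen, m, next, false)
  | node :: rest, seen, m, next =>
    if destination = some node then (seen, m, next, true)
    else
      let st := bfsInner graph node (seen, m, next)
      bfsLevel graph destination rest st.1 st.2.1 st.2.2

-- `while frontier:` — one fuel per level; sufficient for the same reason as in port A
def bfsLoopB (graph : List (Int × List Int)) (destination : Option Int) :
    Nat → List Int → PySem.Dict Int (Option Int) → List Int → PySem.Dict Int (Option Int)
  | 0, _, m, _ => m
  | fuel+1, seen, m, frontier =>
    if frontier = [] then m
    else
      let r := bfsLevel graph destination frontier seen m []
      if r.2.2.2 then r.2.1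
      else bfsLoopB graph destination fuel r.1 r.2.1 r.2.2.1

def BFS_alt (graph : List (Int × List Int)) (start : Int) (destination : Option Int) :
    List (Int × Option Int) :=
  (bfsLoopB graph destination (1 + (graph.flatMap Prod.snd).length)
    (PySem.Set.ofList [start]) (PySem.Dict.ofList [(start, none)]) [start]).items

-- ===== PRECONDITION & SPEC =====
def Spec_BFS (graph : List (Int × List Int)) (start : Int) (destination : Option Int) (out : List (Int × Option Int)) : Prop := out = BFS_alt graph start destination
instance (graph : List (Int × List Int)) (start : Int) (destination : Option Int) (out : List (Int × Option Int)) : Decidable (Spec_BFS graph start destination out) := by unfold Spec_BFS; infer_instance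

-- ===== CLAIM (what is proved, stated in full; the proofs are below) =====
def Claim_equal_BFS : Prop := ∀ (graph : List (Int × List Int)) (start : Int) (destination : Option Int), Dom_BFS graph start destination → Spec_BFS graph start destination (BFS graph start destination)

-- ===== LEMMAS AND PROOFS =====

-- how many elements of s lie in the universe U (the termination measure's bookkeeping)
def bfsCnt (U s : List Int) : Nat := (s.filter (fun x => decide (x ∈ U))).length

lemma bfsCnt_append_singleton (U s : List Int) (x : Int) (hx : x ∈ U) :
    bfsCnt U (s ++ [x]) = bfsCnt U s + 1 := by
  simp [bfsCnt, List.filter_append, hx]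

lemma bfsCnt_le (U s : List Int) (hs : s.Nodup) : bfsCnt U s ≤ U.dedup.length := by
  have h1 : (s.filter (fun x => decide (x ∈ U))).Nodup := hs.filter _
  have h2 : (s.filter (fun x => decide (x ∈ U))).toFinset ⊆ U.toFinset := by
    intro x hx
    simp only [List.mem_toFinset, List.mem_filter, decide_eq_true_eq] at hx ⊢
    exact hx.2
  unfold bfsCnt
  rw [← List.toFinset_card_of_nodup h1, ← List.card_toFinset U]
  exact Finset.card_le_card h2

lemma bfs_getD_subset (g : List (Int × List Int)) (node y : Int)
    (h : y ∈ PySem.Dict.getD (PySem.Dict.mk g) node []) : y ∈ g.flatMap Prod.snd := by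
  induction g with
  | nil => simp [PySem.Dict.getD, PySem.Dict.get?] at h
  | cons p rest ih =>
    simp only [PySem.Dict.getD, PySem.Dict.get?, List.find?] at h ih
    by_cases hk : p.1 == node
    · simp only [hk] at h
      simp only [List.flatMap_cons, List.mem_append]
      exact Or.inl h
    · simp only [hk] at h
      simp only [List.flatMap_cons, List.mem_append]
      exact Or.inr (ih h)

lemma bfsInnerGo_acc (node : Int) :
    ∀ (ns : List Int) (s : List Int) (m : PySem.Dict Int (Option Int)) (q : List Int),
    bfsInnerGo node ns (s, m, q) =
      ((bfsInnerGo node ns (s, m, [])).1, (bfsInnerGo node ns (s, m, [])).2.1,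
       q ++ (bfsInnerGo node ns (s, m, [])).2.2) := by
  intro ns
  induction ns with
  | nil => intro s m q; simp [bfsInnerGo]
  | cons nb rest ih =>
    intro s m q
    simp only [bfsInnerGo, List.foldl_cons] at ih ⊢
    by_cases h : nb ∈ s
    · simpa [h] using ih s m q
    · simp only [h, ite_false]
      rw [ih (PySem.Set.add s nb) (PySem.Dict.insert m nb (some node)) (q ++ [nb]),
          ih (PySem.Set.add s nb) (PySem.Dict.insert m nb (some node)) ([] ++ [nb])]
      simp

lemma bfsInnerGo_facts (U : List Int) (node : Int) :
    ∀ (ns : List Int) (s : List Int) (m : PySem.Dict Int (Option Int)) (q : List Int),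
    (∀ x ∈ ns, x ∈ U) → s.Nodup →
    (bfsInnerGo node ns (s, m, q)).1.Nodup ∧
      bfsCnt U (bfsInnerGo node ns (s, m, q)).1 + q.length
        = bfsCnt U s + (bfsInnerGo node ns (s, m, q)).2.2.length := by
  intro ns
  induction ns with
  | nil => intro s m q _ hs; simpa [bfsInnerGo] using hs
  | cons nb rest ih =>
    intro s m q hU hs
    simp only [bfsInnerGo, List.foldl_cons] at ih ⊢
    by_cases h : nb ∈ s
    · simpa [h] using ih s m q (fun x hx => hU x (List.mem_cons_of_mem _ hx)) hs
    · simp only [h, ite_false]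
      have hadd : PySem.Set.add s nb = s ++ [nb] := by simp [PySem.Set.add, h]
      rw [hadd]
      have hs' : (s ++ [nb]).Nodup :=
        List.Nodup.append hs (List.nodup_singleton nb) (List.disjoint_singleton.mpr h)
      have hcnt : bfsCnt U (s ++ [nb]) = bfsCnt U s + 1 :=
        bfsCnt_append_singleton U s nb (hU nb List.mem_cons_self)
      have hrec := ih (s ++ [nb]) (PySem.Dict.insert m nb (some node)) (q ++ [nb])
        (fun x hx => hU x (List.mem_cons_of_mem _ hx)) hs'
      refine ⟨hrec.1, ?_⟩
      have h2 := hrec.2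
      rw [hcnt] at h2
      simp only [List.length_append, List.length_cons, List.length_nil] at h2 ⊢
      omega

lemma bfsLevel_acc (g : List (Int × List Int)) (d : Option Int) :
    ∀ (F : List Int) (s : List Int) (m : PySem.Dict Int (Option Int)) (next : List Int),
    bfsLevel g d F s m next =
      ((bfsLevel g d F s m []).1, (bfsLevel g d F s m []).2.1,
       next ++ (bfsLevel g d F s m []).2.2.1, (bfsLevel g d F s m []).2.2.2) := by
  intro F
  induction F with
  | nil => intro s m next; simp [bfsLevel]
  | cons node rest ih =>
    intro s m next
    by_cases hd : d = some node
    · simp [bfsLevel, hd]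
    · simp only [bfsLevel, hd, ite_false, bfsInner]
      rw [bfsInnerGo_acc node _ s m next]
      dsimp only
      rw [ih _ _ (next ++ (bfsInnerGo node (PySem.Dict.getD (PySem.Dict.mk g) node []) (s, m, [])).2.2),
          ih _ _ (bfsInnerGo node (PySem.Dict.getD (PySem.Dict.mk g) node []) (s, m, [])).2.2]
      simp [List.append_assoc]

lemma bfsLevel_facts (U : List Int) (g : List (Int × List Int)) (d : Option Int)
    (hG : ∀ node y, y ∈ PySem.Dict.getD (PySem.Dict.mk g) node [] → y ∈ U) :
    ∀ (F : List Int) (s : List Int) (m : PySem.Dict Int (Option Int)) (next : List Int),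
    s.Nodup →
    (bfsLevel g d F s m next).1.Nodup ∧
      bfsCnt U (bfsLevel g d F s m next).1 + next.length
        = bfsCnt U s + (bfsLevel g d F s m next).2.2.1.length := by
  intro F
  induction F with
  | nil => intro s m next hs; simpa [bfsLevel] using hs
  | cons node rest ih =>
    intro s m next hs
    by_cases hd : d = some node
    · simpa [bfsLevel, hd] using hs
    · simp only [bfsLevel, hd, ite_false, bfsInner]
      have hin := bfsInnerGo_facts U node (PySem.Dict.getD (PySem.Dict.mk g) node []) s m next
        (fun x hx => hG node x hx) hs
      have hrec := ih (bfsInnerGo node (PySem.Dict.getD (PySem.Dict.mk g) node []) (s, m, next)).1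
        (bfsInnerGo node (PySem.Dict.getD (PySem.Dict.mk g) node []) (s, m, next)).2.1
        (bfsInnerGo node (PySem.Dict.getD (PySem.Dict.mk g) node []) (s, m, next)).2.2 hin.1
      refine ⟨hrec.1, ?_⟩
      have h1 := hin.2
      have h2 := hrec.2
      omega

lemma bfsLoopA_level (g : List (Int × List Int)) (d : Option Int) :
    ∀ (F tail : List Int) (s : List Int) (m : PySem.Dict Int (Option Int)) (n : Nat),
    bfsLoopA g d (F.length + n) s m (F ++ tail) =
      (if (bfsLevel g d F s m []).2.2.2 then (bfsLevel g d F s m []).2.1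
       else bfsLoopA g d n (bfsLevel g d F s m []).1 (bfsLevel g d F s m []).2.1
         (tail ++ (bfsLevel g d F s m []).2.2.1)) := by
  intro F
  induction F with
  | nil => intro tail s m n; simp [bfsLevel]
  | cons x F' ih =>
    intro tail s m n
    rw [List.length_cons, List.cons_append]
    have harith : F'.length + 1 + n = F'.length + n + 1 := by omega
    rw [harith]
    by_cases hd : d = some x
    · simp [bfsLoopA, bfsLevel, hd]
    · simp only [bfsLoopA, bfsLevel, hd, ite_false, bfsInner]
      rw [bfsInnerGo_acc x _ s m (F' ++ tail)]
      dsimp only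
      rw [List.append_assoc]
      rw [ih (tail ++ (bfsInnerGo x (PySem.Dict.getD (PySem.Dict.mk g) x []) (s, m, [])).2.2) _ _ n]
      rw [bfsLevel_acc g d F' _ _ (bfsInnerGo x (PySem.Dict.getD (PySem.Dict.mk g) x []) (s, m, [])).2.2]
      simp [List.append_assoc]

lemma bfs_loop_eq (U : List Int) (g : List (Int × List Int)) (d : Option Int)
    (hG : ∀ node y, y ∈ PySem.Dict.getD (PySem.Dict.mk g) node [] → y ∈ U) :
    ∀ (nL nD : Nat) (s : List Int) (m : PySem.Dict Int (Option Int)) (F : List Int),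
    s.Nodup →
    F.length + (U.dedup.length - bfsCnt U s) ≤ nD →
    F.length + (U.dedup.length - bfsCnt U s) ≤ nL →
    bfsLoopA g d nD s m F = bfsLoopB g d nL s m F := by
  intro nL
  induction nL with
  | zero =>
    intro nD s m F hs hD hL
    have hF : F = [] := by
      cases F with
      | nil => rfl
      | cons a b => simp only [List.length_cons] at hL; omega
    subst hF
    cases nD <;> simp [bfsLoopA, bfsLoopB]
  | succ nL' ih =>
    intro nD s m F hs hD hL
    cases F with
    | nil => cases nD <;> simp [bfsLoopA, bfsLoopB]
    | cons x F' =>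
      obtain ⟨n, rfl⟩ : ∃ n, nD = (x :: F').length + n :=
        ⟨nD - (x :: F').length, by simp only [List.length_cons] at hD ⊢; omega⟩
      have hA := bfsLoopA_level g d (x :: F') [] s m n
      rw [List.append_nil] at hA
      rw [hA]
      have hB : bfsLoopB g d (nL' + 1) s m (x :: F') =
          (if (bfsLevel g d (x :: F') s m []).2.2.2 then (bfsLevel g d (x :: F') s m []).2.1
           else bfsLoopB g d nL' (bfsLevel g d (x :: F') s m []).1
             (bfsLevel g d (x :: F') s m []).2.1 (bfsLevel g d (x :: F') s m []).2.2.1) := by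
        simp [bfsLoopB]
      rw [hB]
      by_cases hdone : (bfsLevel g d (x :: F') s m []).2.2.2
      · simp [hdone]
      · simp only [hdone, Bool.false_eq_true, ite_false]
        have hfacts := bfsLevel_facts U g d hG (x :: F') s m [] hs
        have hle := bfsCnt_le U _ hfacts.1
        have hle0 := bfsCnt_le U s hs
        have h2 := hfacts.2
        simp only [List.length_nil, Nat.add_zero] at h2
        simp only [List.length_cons] at hD hL
        apply ih
        · exact hfacts.1
        · simp only [List.nil_append]
          omega
        · simp only [List.nil_append]
          omega

-- ===== VERDICT (by name: the statement is the Claim_ definition above) =====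
theorem BFS_spec : Claim_equal_BFS := by
  intro graph start destination _
  show BFS graph start destination = BFS_alt graph start destination
  unfold BFS BFS_alt
  have hofl : PySem.Set.ofList [start] = [start] := by
    simp [PySem.Set.ofList, PySem.Set.add, PySem.Set.empty]
  rw [hofl]
  have hG : ∀ node y, y ∈ PySem.Dict.getD (PySem.Dict.mk graph) node [] →
      y ∈ start :: graph.flatMap Prod.snd :=
    fun node y hy => List.mem_cons_of_mem _ (bfs_getD_subset graph node y hy)
  have hcnt : bfsCnt (start :: graph.flatMap Prod.snd) [start] = 1 := by
    simp [bfsCnt]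
  have hbound : [start].length + ((start :: graph.flatMap Prod.snd).dedup.length
      - bfsCnt (start :: graph.flatMap Prod.snd) [start])
      ≤ 1 + (graph.flatMap Prod.snd).length := by
    have h := (List.dedup_sublist (start :: graph.flatMap Prod.snd)).length_le
    simp only [List.length_cons] at h
    simp only [hcnt, List.length_cons, List.length_nil]
    omega
  rw [bfs_loop_eq (start :: graph.flatMap Prod.snd) graph destination hG _ _ [start]
    (PySem.Dict.ofList [(start, none)]) [start] (List.nodup_singleton start) hbound hbound]
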